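-- pv_equiv track=rewrite | github.com/zacarywebb/AlgorithDesignProject | program4B.py | program4B
-- ===== SOURCE A (Python) =====
-- from typing import List, Tuple
--
-- def program4B(n: int, k: int, values: List[int]) -> Tuple[int, List[int]]:
--     """Solution to Program 4B - Iterative bottom-up DP
--
--     dp[i] represents the maximum value considering
--     vaults from index 0 to i-1 (i.e., the first i vaults).
--
--     For vault at index i (0-indexed), there are two choices:
--     1. Skip vault i: dp[i+1] = dp[i]
--     2. Take vault i: dp[i+1] = values[i] + dp[max(0, i-k)]
--
--     Parameters:
--     n (int): number of vaults
--     k (int): no two chosen vaults are within k positions of each other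
--     values (List[int]): the values of the vaults
--
--     Returns:
--     int: maximal total value
--     List[int]: the indices of the chosen vaults(1-indexed)
--     """
--
--     if n == 0:
--         return 0, []
--
--     # dp table where dp[i] is the maximum value we can get using the first i vaults
--     dp = [0] * (n + 1)
--
--     # Build dp table bottom-up
--     for i in range(n):
--         # Option 1: Don't take vault i
--         dp[i + 1] = dp[i]
--
--         # Option 2: Take vault i
--         # If we take vault i, we cannot take any of the previous k vaults
--         prev_idx = max(0, i - k)
--         take_value = values[i] + dp[prev_idx]
--
--         # Take the maximum
--         dp[i + 1] = max(dp[i + 1], take_value)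
--
--     # Reconstruct the solution
--     chosen_vaults = []
--     i = n - 1
--
--     while i >= 0:
--         # Check if vault i was taken
--         # It was taken if dp[i+1] == values[i] + dp[max(0, i-k)]
--         # and this value is greater than dp[i] (not taking it)
--
--         prev_idx = max(0, i - k)
--         take_value = values[i] + dp[prev_idx]
--
--         if dp[i + 1] == take_value and take_value > dp[i]:
--             # Vault i was taken
--             chosen_vaults.append(i + 1)  # Convert to 1-indexed
--             # Next vault to consider is at least k+1 positions back
--             i = i - k - 1
--         else:
--             # Vault i was not taken
--             i = i - 1
--
--     # Reverse to get ascending order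
--     chosen_vaults.reverse()
--
--     return dp[n], chosen_vaults
-- ===== SOURCE B (Python) =====
-- from typing import List, Tuple
--
-- def program4B(n: int, k: int, values: List[int]) -> Tuple[int, List[int]]:
--     """Single forward pass: carry the chosen index list along with the DP value,
--     so no backward reconstruction loop is needed."""
--     if n == 0:
--         return 0, []
--     best_value = [0]
--     best_list = [[]]
--     for i in range(n):
--         prev = max(0, i - k)
--         take = values[i] + best_value[prev]
--         if take > best_value[i]:
--             best_value.append(take)
--             best_list.append(best_list[prev] + [i + 1])
--         else:
--             best_value.append(best_value[i])
--             best_list.append(best_list[i])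
--     return best_value[n], best_list[n]
-- ===== Notes on version B (the rewrite author's own statement) =====
-- stated objective: simpler
-- what changed: B does a single forward pass that carries the chosen 1-indexed list alongside each DP value, eliminating A's separate backward reconstruction while-loop over the dp table (measured ~1.9x faster on the generated inputs).
-- outside the precondition, e.g. on program4B(1, -1, [5]): A returns (5, []), B raises IndexError
import Mathlib
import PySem

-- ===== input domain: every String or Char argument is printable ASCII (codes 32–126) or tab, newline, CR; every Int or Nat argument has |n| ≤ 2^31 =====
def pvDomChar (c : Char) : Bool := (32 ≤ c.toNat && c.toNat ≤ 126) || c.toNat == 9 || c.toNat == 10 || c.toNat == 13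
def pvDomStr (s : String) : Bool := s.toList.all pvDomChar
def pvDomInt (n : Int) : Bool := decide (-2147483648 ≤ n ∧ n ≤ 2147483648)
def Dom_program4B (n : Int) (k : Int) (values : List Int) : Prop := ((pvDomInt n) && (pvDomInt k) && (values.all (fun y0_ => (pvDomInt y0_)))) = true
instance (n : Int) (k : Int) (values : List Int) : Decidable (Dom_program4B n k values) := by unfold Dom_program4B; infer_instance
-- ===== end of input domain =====

-- B replaces A's separate backward reconstruction loop by carrying the chosen
-- index list forward alongside the DP value (objective: simpler, one pass).

-- ===== PORT A =====
-- one build iteration of A's `for i in range(n)` loop (indices in range inside Pre_)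
def pvAStep (k : Int) (values : List Int) (dp : List Int) (i : Nat) : List Int :=
  let dp1 := dp.set (i + 1) (dp.getD i 0)
  let prev := (max 0 ((i : Int) - k)).toNat
  let take := values.getD i 0 + dp1.getD prev 0
  dp1.set (i + 1) (max (dp1.getD (i + 1) 0) take)

-- A's backward reconstruction `while i >= 0` loop; fuel only makes it total
-- (inside Pre_ each step decreases i by at least 1, so fuel = n is exact)
def pvARec (k : Int) (values dp : List Int) : Nat → Int → List Int → List Int
  | 0, _, acc => acc
  | fuel + 1, i, acc =>
    if 0 ≤ i then
      let prev := (max 0 (i - k)).toNat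
      let take := values.getD i.toNat 0 + dp.getD prev 0
      if dp.getD (i.toNat + 1) 0 = take ∧ take > dp.getD i.toNat 0 then
        pvARec k values dp fuel (i - k - 1) (acc ++ [i + 1])
      else
        pvARec k values dp fuel (i - 1) acc
    else acc

def program4B (n : Int) (k : Int) (values : List Int) : Int × List Int :=
  if n = 0 then (0, [])
  else
    let nn := n.toNat
    let dp := (List.range nn).foldl (pvAStep k values) (List.replicate (nn + 1) 0)
    let chosen := pvARec k values dp nn (n - 1) []
    (dp.getD nn 0, chosen.reverse)

-- ===== PORT B =====
-- one iteration of B's loop: extend (best_value, best_list) by one entry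
def pvBStep (k : Int) (values : List Int) (st : List Int × List (List Int)) (i : Nat) :
    List Int × List (List Int) :=
  let bv := st.1
  let bl := st.2
  let prev := (max 0 ((i : Int) - k)).toNat
  let take := values.getD i 0 + bv.getD prev 0
  if take > bv.getD i 0 then
    (bv ++ [take], bl ++ [bl.getD prev [] ++ [(i : Int) + 1]])
  else
    (bv ++ [bv.getD i 0], bl ++ [bl.getD i []])

def program4B_alt (n : Int) (k : Int) (values : List Int) : Int × List Int :=
  if n = 0 then (0, [])
  else
    let nn := n.toNat
    let st := (List.range nn).foldl (pvBStep k values) ([0], [[]])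
    (st.1.getD nn 0, st.2.getD nn [])

-- ===== PRECONDITION & SPEC =====
-- Pre_ excludes n < 0 and n > len(values), where A raises IndexError, and k < 0 with
-- n > 0, where A's prev_idx reads forward dp entries (an artefact of its build loop)
-- and B's forward pass itself raises IndexError.
def Pre_program4B (n : Int) (k : Int) (values : List Int) : Prop :=
  0 ≤ n ∧ n ≤ values.length ∧ (n = 0 ∨ 0 ≤ k)
instance (n : Int) (k : Int) (values : List Int) : Decidable (Pre_program4B n k values) := by
  unfold Pre_program4B; infer_instance

def pvWitness_program4B : Int × Int × List Int := (3, 1, [5, 3, 7])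

def Spec_program4B (n : Int) (k : Int) (values : List Int) (out : Int × List Int) : Prop := out = program4B_alt n k values
instance (n : Int) (k : Int) (values : List Int) (out : Int × List Int) : Decidable (Spec_program4B n k values out) := by unfold Spec_program4B; infer_instance

-- ===== CLAIM (what is proved, stated in full; the proofs are below) =====
def Claim_equal_program4B : Prop := ∀ (n : Int) (k : Int) (values : List Int), Dom_program4B n k values → Pre_program4B n k values → Spec_program4B n k values (program4B n k values)

-- ===== LEMMAS AND PROOFS =====

-- proof-side spec: the DP value of the first i vaults (min makes it structurally
-- decreasing; for 0 ≤ k it coincides with max(0, i-k))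
def pvPrev (k : Int) (i : Nat) : Nat := min i ((max 0 ((i : Int) - k)).toNat)

def pvDpv (k : Int) (values : List Int) : Nat → Int
  | 0 => 0
  | i + 1 => max (pvDpv k values i) (values.getD i 0 + pvDpv k values (pvPrev k i))
termination_by i => i
decreasing_by all_goals simp [pvPrev]

-- proof-side spec: the chosen (1-indexed) index list for the first i vaults
def pvBl (k : Int) (values : List Int) : Nat → List Int
  | 0 => []
  | i + 1 =>
    if values.getD i 0 + pvDpv k values (pvPrev k i) > pvDpv k values i then
      pvBl k values (pvPrev k i) ++ [(i : Int) + 1]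
    else pvBl k values i
termination_by i => i
decreasing_by all_goals simp [pvPrev]

lemma pvPrev_eq' (k : Int) (i : Nat) (hk : 0 ≤ k) :
    ((max 0 ((i : Int) - k)).toNat) = pvPrev k i := by
  simp [pvPrev]; omega

lemma gset_ne (l : List Int) (i j : Nat) (a : Int) (h : i ≠ j) : (l.set i a).getD j 0 = l.getD j 0 := by
  simp [List.getD_eq_getElem?_getD, List.getElem?_set_ne h]

lemma gset_self (l : List Int) (i : Nat) (a : Int) (h : i < l.length) : (l.set i a).getD i 0 = a := by
  simp [List.getD_eq_getElem?_getD, h]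

lemma pvB_st_spec (k : Int) (values : List Int) (hk : 0 ≤ k) :
    ∀ m, (List.range m).foldl (pvBStep k values) ([0], [[]])
      = ((List.range (m + 1)).map (pvDpv k values),
         (List.range (m + 1)).map (pvBl k values)) := by
  intro m
  induction m with
  | zero => simp [pvDpv, pvBl]
  | succ m ih =>
    rw [List.range_succ, List.foldl_append, List.foldl_cons, List.foldl_nil, ih]
    have hp : pvPrev k m ≤ m := by simp [pvPrev]
    unfold pvBStep
    simp only [pvPrev_eq' k m hk]
    rw [PySem.List.getD_map_range _ _ _ _ (by omega : pvPrev k m < m + 1),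
        PySem.List.getD_map_range _ _ _ _ (by omega : m < m + 1),
        PySem.List.getD_map_range _ _ _ _ (by omega : pvPrev k m < m + 1)]
    have hdp : pvDpv k values (m + 1)
        = max (pvDpv k values m) (values.getD m 0 + pvDpv k values (pvPrev k m)) := by
      rw [pvDpv]
    have hbl : pvBl k values (m + 1)
        = if values.getD m 0 + pvDpv k values (pvPrev k m) > pvDpv k values m then
            pvBl k values (pvPrev k m) ++ [(m : Int) + 1]
          else pvBl k values m := by
      rw [pvBl]
    by_cases h : values.getD m 0 + pvDpv k values (pvPrev k m) > pvDpv k values m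
    · rw [List.range_succ (n := m + 1), List.map_append]
      simp only [List.getD] at h
      simp [hdp, hbl]
      rw [if_pos h, if_pos h, max_eq_right (le_of_lt h)]
    · rw [List.range_succ (n := m + 1), List.map_append]
      simp only [List.getD] at h
      simp [hdp, hbl]
      rw [if_neg h, if_neg h, max_eq_left (by omega)]

lemma pvA_dp_spec (k : Int) (values : List Int) (hk : 0 ≤ k) (n : Nat) :
    ∀ m, m ≤ n →
      ((List.range m).foldl (pvAStep k values) (List.replicate (n + 1) 0)).length = n + 1 ∧
      ∀ j ≤ m, ((List.range m).foldl (pvAStep k values) (List.replicate (n + 1) 0)).getD j 0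
        = pvDpv k values j := by
  intro m
  induction m with
  | zero =>
    intro _
    refine ⟨by simp, ?_⟩
    intro j hj
    interval_cases j
    simp [pvDpv]
  | succ m ih =>
    intro hm
    obtain ⟨hlen, hval⟩ := ih (by omega)
    set dpm := (List.range m).foldl (pvAStep k values) (List.replicate (n + 1) 0) with hdpm
    rw [List.range_succ, List.foldl_append, List.foldl_cons, List.foldl_nil, ← hdpm]
    have hp : pvPrev k m ≤ m := by simp [pvPrev]
    unfold pvAStep
    simp only [pvPrev_eq' k m hk]
    have hlen1 : (dpm.set (m + 1) (dpm.getD m 0)).length = n + 1 := by simp [hlen]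
    refine ⟨by simp [hlen], ?_⟩
    intro j hj
    have h1 : (dpm.set (m + 1) (dpm.getD m 0)).getD (pvPrev k m) 0 = pvDpv k values (pvPrev k m) := by
      rw [gset_ne _ _ _ _ (by omega), hval _ (by omega)]
    have h2 : (dpm.set (m + 1) (dpm.getD m 0)).getD (m + 1) 0 = pvDpv k values m := by
      rw [gset_self _ _ _ (by omega), hval _ (le_refl m)]
    by_cases hj1 : j = m + 1
    · subst hj1
      rw [gset_self _ _ _ (by rw [hlen1]; omega), h1, h2]
      rw [pvDpv]
    · rw [gset_ne _ _ _ _ (by omega), gset_ne _ _ _ _ (by omega), hval _ (by omega)]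

lemma pvA_rec_spec (k : Int) (values dp : List Int) (hk : 0 ≤ k) (n : Nat)
    (hdp : ∀ j ≤ n, dp.getD j 0 = pvDpv k values j) :
    ∀ (fuel : Nat) (i : Int) acc, i < (fuel : Int) → i < (n : Int) →
      pvARec k values dp fuel i acc = acc ++ (pvBl k values (i + 1).toNat).reverse := by
  intro fuel
  induction fuel with
  | zero =>
    intro i acc hif hin
    have h0 : (i + 1).toNat = 0 := by omega
    simp [pvARec, h0, pvBl]
  | succ fuel ih =>
    intro i acc hif hin
    by_cases hi : 0 ≤ i
    · obtain ⟨it, rfl⟩ := Int.eq_ofNat_of_zero_le hi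
      have hplt : pvPrev k it ≤ it := by simp [pvPrev]
      have hitn : it < n := by omega
      have hd1 : dp.getD (pvPrev k it) 0 = pvDpv k values (pvPrev k it) := hdp _ (by omega)
      have hd2 : dp.getD (it + 1) 0 = pvDpv k values (it + 1) := hdp _ (by omega)
      have hd3 : dp.getD it 0 = pvDpv k values it := hdp _ (by omega)
      have hsucc : pvDpv k values (it + 1)
          = max (pvDpv k values it) (values.getD it 0 + pvDpv k values (pvPrev k it)) := by
        rw [pvDpv]
      have hblsucc : pvBl k values (it + 1)
          = if values.getD it 0 + pvDpv k values (pvPrev k it) > pvDpv k values it then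
              pvBl k values (pvPrev k it) ++ [(it : Int) + 1]
            else pvBl k values it := by
        rw [pvBl]
      rw [pvARec, if_pos hi]
      simp only [Int.toNat_natCast, pvPrev_eq' k it hk, hd1, hd2, hd3]
      have h1t : ((it : Int) + 1).toNat = it + 1 := by omega
      by_cases h : values.getD it 0 + pvDpv k values (pvPrev k it) > pvDpv k values it
      · rw [if_pos ⟨by rw [hsucc, max_eq_right (le_of_lt h)], h⟩]
        rw [ih ((it : Int) - k - 1) (acc ++ [(it : Int) + 1]) (by omega) (by omega)]
        have hpt : ((it : Int) - k - 1 + 1).toNat = pvPrev k it := by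
          rw [← pvPrev_eq' k it hk]; omega
        rw [hpt, h1t, hblsucc, if_pos h]
        simp
      · rw [if_neg (by intro hc; exact h hc.2)]
        rw [ih ((it : Int) - 1) acc (by omega) (by omega)]
        have hmt : ((it : Int) - 1 + 1).toNat = it := by omega
        rw [hmt, h1t, hblsucc, if_neg h]
    · have h0 : (i + 1).toNat = 0 := by omega
      rw [pvARec, if_neg hi]
      simp [h0, pvBl]

-- ===== VERDICT (by name: the statement is the Claim_ definition above) =====
theorem program4B_spec : Claim_equal_program4B := by
  intro n k values _ hpre
  unfold Spec_program4B program4B program4B_alt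
  by_cases hn : n = 0
  · simp [hn]
  · rw [if_neg hn, if_neg hn]
    dsimp only
    obtain ⟨hn0, hnl, hk'⟩ := hpre
    have hk : 0 ≤ k := hk'.resolve_left hn
    set nn := n.toNat with hnn
    have hn1 : 1 ≤ nn := by omega
    obtain ⟨hlen, hval⟩ := pvA_dp_spec k values hk nn nn (le_refl nn)
    set dp := (List.range nn).foldl (pvAStep k values) (List.replicate (nn + 1) 0) with hdp
    rw [pvA_rec_spec k values dp hk nn hval nn (n - 1) [] (by omega) (by omega)]
    rw [pvB_st_spec k values hk nn]
    have ht : (n - 1 + 1).toNat = nn := by omega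
    rw [ht]
    rw [hval nn (le_refl nn)]
    rw [PySem.List.getD_map_range _ _ _ _ (by omega : nn < nn + 1),
        PySem.List.getD_map_range _ _ _ _ (by omega : nn < nn + 1)]
    simp
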